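-- pv_equiv track=rewrite | github.com/paulbalan/rcproiect | BibliotecaMqtt/package_encoder.py | encodeRemainingLength
-- ===== SOURCE A (Python) =====
-- def encodeRemainingLength(remLength) -> str:
--     if remLength == 0:
--         return "00000000"
--
--     remLengthStr = ""
--     while remLength > 0:
--         # encodedByte = remLength % 128
--         encodedByte = divmod(remLength, 128)[1]
--         # remLength = [remLength / 128]
--         remLength = divmod(remLength, 128)[0]
--
--         if remLength > 0:
--             encodedByte = (encodedByte | 128)
--
--         remLengthStr += format(encodedByte, '08b')
--
--     return remLengthStr
-- ===== SOURCE B (Python) =====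
-- def encodeRemainingLength(remLength) -> str:
--     if remLength == 0:
--         return "00000000"
--     bits = format(remLength, 'b')
--     bits = '0' * (-len(bits) % 7) + bits
--     chunks = [bits[i:i + 7] for i in range(0, len(bits), 7)]
--     out = ""
--     for j in range(len(chunks) - 1, -1, -1):
--         out += ('0' if j == 0 else '1') + chunks[j]
--     return out
-- ===== Notes on version B (the rewrite author's own statement) =====
-- stated objective: alternative
-- what changed: B never extracts numeric base-128 digits: it takes the binary text format(n,'b'), zero-pads it to a multiple of 7, slices it into 7-bit chunks by string slicing, and emits the chunks back-to-front prefixing each with its continuation bit, while A runs a destructive divmod-by-128 loop with a lookahead on the quotient.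
-- outside the precondition, e.g. on encodeRemainingLength(-5): A returns '', B returns '0000-101'
import Mathlib
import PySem

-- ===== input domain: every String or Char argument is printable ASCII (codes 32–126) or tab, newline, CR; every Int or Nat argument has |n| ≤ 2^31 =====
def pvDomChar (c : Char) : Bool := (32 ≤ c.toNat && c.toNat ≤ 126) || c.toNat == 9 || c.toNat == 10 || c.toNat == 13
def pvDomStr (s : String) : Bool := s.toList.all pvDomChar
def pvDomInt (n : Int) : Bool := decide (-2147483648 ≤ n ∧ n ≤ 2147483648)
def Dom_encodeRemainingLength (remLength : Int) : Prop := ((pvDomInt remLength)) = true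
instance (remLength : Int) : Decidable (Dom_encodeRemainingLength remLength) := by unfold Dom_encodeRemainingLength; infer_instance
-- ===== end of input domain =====

-- B replaces A's destructive divmod-by-128 loop (with its lookahead on the quotient) by text
-- processing: slice the zero-padded binary string format(n,'b') into 7-bit chunks and emit them
-- back-to-front with a continuation-bit prefix; same return value on the natural domain
-- (objective: alternative, same asymptotic cost).

-- format(n, '08b'): 8-bit zero-padded binary, hand-ported (A's formatting helper);
-- exact for 0 ≤ n ≤ 255, which covers every argument A passes to it.
def pvBin8 (n : Int) : String :=
  String.ofList (((List.range 8).reverse).map (fun i => if n.toNat.testBit i then '1' else '0'))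

-- ===== PORT A =====
-- A's while loop carrying remLengthStr; divmod(remLength, 128) has the literal nonzero
-- divisor 128, so its components are exactly (PySem.Int.floordiv, PySem.Int.mod);
-- the assignments encodedByte / remLength are inlined
def pvEncALoop (remLength : Int) (remLengthStr : String) : String :=
  if remLength > 0 then
    pvEncALoop (PySem.Int.floordiv remLength 128)
      (remLengthStr ++ pvBin8 (if PySem.Int.floordiv remLength 128 > 0
        then PySem.Int.bor (PySem.Int.mod remLength 128) 128
        else PySem.Int.mod remLength 128))
  else remLengthStr
termination_by remLength.toNat
decreasing_by rw [PySem.Int.floordiv_eq_ediv_of_pos (by norm_num)]; omega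

def encodeRemainingLength (remLength : Int) : String :=
  if remLength == 0 then "00000000" else pvEncALoop remLength ""

-- ===== PORT B =====
-- bits = format(remLength,'b') is PySem.Int.toBinChars; the padded string, the chunk list
-- comprehension and the descending emit loop are transcribed step for step on List Char
-- (the Python str is ported as its character list, turned into a String at the return).
def encodeRemainingLength_alt (remLength : Int) : String :=
  if remLength == 0 then "00000000"
  else
    let bits0 := PySem.Int.toBinChars remLength
    let bits := List.replicate (PySem.Int.mod (-(bits0.length : Int)) 7).toNat '0' ++ bits0
    let chunks := (PySem.List.pyRange 0 (bits.length : Int) 7).map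
      (fun i => PySem.List.slice bits (some i) (some (i + 7)))
    String.ofList ((PySem.List.pyRange ((chunks.length : Int) - 1) (-1) (-1)).foldl
      (fun out j => out ++ (if j == 0 then ['0'] else ['1']) ++ PySem.List.pyGetD chunks j [])
      [])

-- ===== PRECONDITION & SPEC =====
-- Pre_ restricts to the natural domain: a remaining length is a nonnegative byte count.
-- It excludes negative remLength, where A returns "" as an accident of its loop never running
-- and B's chunking of the '-'-prefixed binary text is equally meaningless.
def Pre_encodeRemainingLength (remLength : Int) : Prop := 0 ≤ remLength
instance (remLength : Int) : Decidable (Pre_encodeRemainingLength remLength) := by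
  unfold Pre_encodeRemainingLength; infer_instance

def pvWitness_encodeRemainingLength : Int := 300

def Spec_encodeRemainingLength (remLength : Int) (out : String) : Prop := out = encodeRemainingLength_alt remLength
instance (remLength : Int) (out : String) : Decidable (Spec_encodeRemainingLength remLength out) := by unfold Spec_encodeRemainingLength; infer_instance

-- ===== CLAIM (what is proved, stated in full; the proofs are below) =====
def Claim_equal_encodeRemainingLength : Prop := ∀ (remLength : Int), Dom_encodeRemainingLength remLength → Pre_encodeRemainingLength remLength → Spec_encodeRemainingLength remLength (encodeRemainingLength remLength)

-- ===== LEMMAS AND PROOFS =====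

-- fixed-width binary text of x, k bits, most significant first
def pvBinFix (k : Nat) (x : Nat) : List Char :=
  (List.range k).reverse.map (fun i => if x.testBit i then '1' else '0')

def pvBin7 (d : Int) : List Char := pvBinFix 7 d.toNat

-- the character list both programs produce: continuation bit on every digit but the last
def pvRenderL : List Int → List Char
  | [] => []
  | [d] => '0' :: pvBin7 d
  | d :: d' :: rest => '1' :: pvBin7 d ++ pvRenderL (d' :: rest)

-- A's base-128 digits, least significant first (proof-side description of A's loop)
def pvDigits (n : Int) : List Int :=
  if n > 0 then PySem.Int.mod n 128 :: pvDigits (PySem.Int.floordiv n 128) else []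
termination_by n.toNat
decreasing_by rw [PySem.Int.floordiv_eq_ediv_of_pos (by norm_num)]; omega

lemma pvRangeRevSucc {α : Type} (k : Nat) (f : Nat → α) :
    (List.range (k + 1)).reverse.map f = f k :: (List.range k).reverse.map f := by
  rw [List.range_succ]; simp

lemma pvBin8_low (d : Int) (h0 : 0 ≤ d) (h : d < 128) :
    pvBin8 d = String.ofList ('0' :: pvBin7 d) := by
  unfold pvBin8 pvBin7 pvBinFix
  rw [pvRangeRevSucc 7]
  have : d.toNat.testBit 7 = false := Nat.testBit_lt_two_pow (by omega)
  simp [this]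

lemma pvBin8_high (d : Int) (h0 : 0 ≤ d) (_h : d < 128) :
    pvBin8 (PySem.Int.bor d 128) = String.ofList ('1' :: pvBin7 d) := by
  unfold pvBin8 pvBin7 pvBinFix
  rw [PySem.Int.bor_of_nonneg h0 (by norm_num)]
  have h128 : (128 : Int).toNat = 2 ^ 7 := by decide
  rw [h128, pvRangeRevSucc 7]
  have htop : ((d.toNat ||| 2 ^ 7 : Nat) : Int).toNat.testBit 7 = true := by
    rw [Int.toNat_natCast, Nat.testBit_or, Nat.testBit_two_pow_self]
    simp
  have hmap : (List.range 7).reverse.map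
        (fun i => if ((d.toNat ||| 2 ^ 7 : Nat) : Int).toNat.testBit i then '1' else '0')
      = (List.range 7).reverse.map (fun i => if d.toNat.testBit i then '1' else '0') := by
    apply List.map_congr_left
    intro i hi
    simp only [List.mem_reverse, List.mem_range] at hi
    rw [Int.toNat_natCast, Nat.testBit_or, Nat.testBit_two_pow_of_ne (by omega)]
    simp
  rw [htop, hmap]
  rfl

-- A's loop renders its digit list with pvBin8 and the quotient lookahead
def pvRenderA : List Int → String
  | [] => ""
  | [d] => pvBin8 d
  | d :: d' :: rest => pvBin8 (PySem.Int.bor d 128) ++ pvRenderA (d' :: rest)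

lemma pvEncALoop_eq (n : Int) (acc : String) :
    pvEncALoop n acc = acc ++ pvRenderA (pvDigits n) := by
  induction n, acc using pvEncALoop.induct with
  | case1 n acc h ih =>
    simp only [dite_eq_ite] at ih
    rw [pvEncALoop, if_pos h, pvDigits, if_pos h, ih]
    by_cases hq : PySem.Int.floordiv n 128 > 0
    · rw [pvDigits, if_pos hq]
      simp only [hq, if_pos]
      rw [pvRenderA, String.append_assoc]
    · rw [pvDigits, if_neg hq]
      simp only [hq, if_false]
      rw [pvRenderA, pvRenderA, String.append_empty]
  | case2 n acc h => rw [pvEncALoop, if_neg h, pvDigits, if_neg h, pvRenderA, String.append_empty]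

lemma pvDigits_bounds (n : Int) : ∀ d ∈ pvDigits n, 0 ≤ d ∧ d < 128 := by
  induction n using pvDigits.induct with
  | case1 n h ih =>
    rw [pvDigits, if_pos h]
    intro d hd
    rcases List.mem_cons.mp hd with h1 | h2
    · subst h1
      exact ⟨PySem.Int.mod_nonneg _ (by norm_num), PySem.Int.mod_lt _ (by norm_num)⟩
    · exact ih d h2
  | case2 n h => rw [pvDigits, if_neg h]; simp

lemma pvRenderA_eq (ds : List Int) (h : ∀ d ∈ ds, 0 ≤ d ∧ d < 128) :
    pvRenderA ds = String.ofList (pvRenderL ds) := by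
  match ds with
  | [] => rfl
  | [d] =>
    have := h d (by simp)
    rw [pvRenderA, pvRenderL, pvBin8_low d this.1 this.2]
  | d :: d' :: rest =>
    have hd := h d (by simp)
    rw [pvRenderA, pvRenderL, pvBin8_high d hd.1 hd.2,
        pvRenderA_eq (d' :: rest) (fun x hx => h x (List.mem_cons_of_mem _ hx))]
    rw [← String.ofList_append]

-- ---- Nat.toDigits 2 (format(n,'b')) characterisation ----

lemma pvTDC_acc (f n : Nat) (l : List Char) :
    Nat.toDigitsCore 2 f n l = Nat.toDigitsCore 2 f n [] ++ l := by
  induction f generalizing n l with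
  | zero => simp [Nat.toDigitsCore]
  | succ f ih =>
    simp only [Nat.toDigitsCore]
    by_cases h : n / 2 = 0
    · simp [h]
    · simp only [h, if_false]
      rw [ih (n / 2) (Nat.digitChar (n % 2) :: l), ih (n / 2) [Nat.digitChar (n % 2)]]
      simp

lemma pvTDC_fuel (f n : Nat) (h : n < f) :
    Nat.toDigitsCore 2 f n [] = Nat.toDigitsCore 2 (n + 1) n [] := by
  induction n using Nat.strong_induction_on generalizing f with
  | _ n ih =>
    cases f with
    | zero => omega
    | succ f =>
      simp only [Nat.toDigitsCore]
      by_cases h2 : n / 2 = 0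
      · simp [h2]
      · simp only [h2, if_false]
        rw [pvTDC_acc f (n / 2), pvTDC_acc n (n / 2)]
        have hlt : n / 2 < n := Nat.div_lt_self (by omega) (by omega)
        rw [ih (n / 2) hlt f (by omega), ih (n / 2) hlt n (by omega)]

lemma pvToDigits_step (m : Nat) (h : 2 ≤ m) :
    Nat.toDigits 2 m = Nat.toDigits 2 (m / 2) ++ [Nat.digitChar (m % 2)] := by
  unfold Nat.toDigits
  conv_lhs => rw [Nat.toDigitsCore]
  have h2 : ¬ m / 2 = 0 := by omega
  simp only [h2, if_false]
  rw [pvTDC_acc m (m / 2), pvTDC_fuel m (m / 2) (by omega)]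

lemma pvToDigits_small (m : Nat) (h : m < 2) : Nat.toDigits 2 m = [Nat.digitChar m] := by
  interval_cases m <;> rfl

lemma pvToDigits_lt (m : Nat) : m < 2 ^ (Nat.toDigits 2 m).length := by
  induction m using Nat.strong_induction_on with
  | _ m ih =>
    by_cases h : m < 2
    · rw [pvToDigits_small m h]; simpa using h
    · rw [pvToDigits_step m (by omega)]
      have := ih (m / 2) (Nat.div_lt_self (by omega) (by omega))
      simp only [List.length_append, List.length_singleton]
      rw [pow_succ]
      omega

lemma pvToDigits_len_pos (m : Nat) : 1 ≤ (Nat.toDigits 2 m).length := by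
  by_cases h : m < 2
  · rw [pvToDigits_small m h]; simp
  · rw [pvToDigits_step m (by omega)]; simp

lemma pvToDigits_ge (m : Nat) (hm : 0 < m) : 2 ^ ((Nat.toDigits 2 m).length - 1) ≤ m := by
  induction m using Nat.strong_induction_on with
  | _ m ih =>
    by_cases h : m < 2
    · rw [pvToDigits_small m h]; simpa using hm
    · rw [pvToDigits_step m (by omega)]
      have h2 : 0 < m / 2 := by omega
      have hrec := ih (m / 2) (Nat.div_lt_self (by omega) (by omega)) h2
      have hlen := pvToDigits_len_pos (m / 2)
      simp only [List.length_append, List.length_singleton]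
      have hp : 2 ^ ((Nat.toDigits 2 (m / 2)).length + 1 - 1)
          = 2 ^ ((Nat.toDigits 2 (m / 2)).length - 1) * 2 := by
        rw [← pow_succ]
        congr 1
        omega
      rw [hp]
      omega

lemma pvBinFix_zero (k : Nat) : pvBinFix k 0 = List.replicate k '0' := by
  unfold pvBinFix
  rw [List.eq_replicate_iff]
  refine ⟨by simp, ?_⟩
  intro b hb
  simp only [List.mem_map, List.mem_reverse, List.mem_range] at hb
  obtain ⟨i, _, hi⟩ := hb
  simpa [Nat.zero_testBit] using hi.symm

lemma pvBinFix_low (k m : Nat) :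
    pvBinFix (k + 1) m = pvBinFix k (m / 2) ++ [if m.testBit 0 then '1' else '0'] := by
  unfold pvBinFix
  rw [List.range_succ_eq_map]
  simp only [List.reverse_cons, List.map_append, List.map_map, List.map_reverse]
  congr 1
  · rw [← List.map_reverse, ← List.map_reverse]
    apply List.map_congr_left
    intro i _
    simp [Nat.testBit_add_one]

-- padded binary text = fixed-width binary
lemma pvPadded_eq (k m : Nat) (hk : 1 ≤ k) (hm : m < 2 ^ k) :
    List.replicate (k - (Nat.toDigits 2 m).length) '0' ++ Nat.toDigits 2 m = pvBinFix k m := by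
  induction k generalizing m with
  | zero => omega
  | succ k ih =>
    by_cases hk0 : k = 0
    · subst hk0
      have : m < 2 := by simpa using hm
      rw [pvToDigits_small m this]
      unfold pvBinFix
      interval_cases m <;> rfl
    · by_cases hsm : m < 2
      · rw [pvToDigits_small m hsm, pvBinFix_low k m]
        have hdiv : m / 2 = 0 := by omega
        rw [hdiv, pvBinFix_zero]
        simp only [List.length_singleton]
        have : List.replicate (k + 1 - 1) '0' = List.replicate k '0' := by congr 1
        rw [this]
        congr 1
        interval_cases m <;> rfl
      · rw [pvToDigits_step m (by omega), pvBinFix_low k m]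
        have hmd : m / 2 < 2 ^ k := by
          rw [pow_succ] at hm
          omega
        rw [← ih (m / 2) (by omega) hmd]
        have hlen : (Nat.toDigits 2 (m / 2) ++ [Nat.digitChar (m % 2)]).length
            = (Nat.toDigits 2 (m / 2)).length + 1 := by simp
        rw [hlen]
        have : k + 1 - ((Nat.toDigits 2 (m / 2)).length + 1) = k - (Nat.toDigits 2 (m / 2)).length := by
          omega
        rw [this, List.append_assoc]
        congr 2
        rcases Nat.mod_two_eq_zero_or_one m with h2 | h2 <;>
          simp [h2, Nat.testBit_zero, Nat.digitChar]

lemma pvBinFix_split (t x : Nat) :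
    pvBinFix (7 * (t + 1)) x = pvBinFix (7 * t) (x / 128) ++ pvBinFix 7 (x % 128) := by
  unfold pvBinFix
  have h7 : 7 * (t + 1) = 7 + 7 * t := by ring
  rw [h7, List.range_add]
  simp only [List.reverse_append, List.map_append, List.map_reverse, List.map_map]
  congr 1
  · rw [← List.map_reverse, ← List.map_reverse]
    apply List.map_congr_left
    intro i _
    have : (7 : Nat) + i = i + 7 := by ring
    simp only [Function.comp_apply, this]
    have h128 : (128 : Nat) = 2 ^ 7 := by norm_num
    rw [h128, ← Nat.testBit_div_two_pow]
  · rw [← List.map_reverse, ← List.map_reverse]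
    apply List.map_congr_left
    intro i hi
    simp only [List.mem_reverse, List.mem_range] at hi
    have h128 : (128 : Nat) = 2 ^ 7 := by norm_num
    rw [h128, Nat.testBit_mod_two_pow]
    simp [hi]

-- digit-count brackets for A's digits
lemma pvDigits_brackets (n : Int) (h : 0 < n) :
    n.toNat < 2 ^ (7 * (pvDigits n).length) ∧
      2 ^ (7 * ((pvDigits n).length - 1)) ≤ n.toNat ∧ 1 ≤ (pvDigits n).length := by
  induction n using pvDigits.induct with
  | case1 n hn ih =>
    rw [pvDigits, if_pos hn]
    have hq : PySem.Int.floordiv n 128 = n / 128 := PySem.Int.floordiv_eq_ediv_of_pos (by norm_num)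
    by_cases hlt : n < 128
    · have hq0 : ¬ (PySem.Int.floordiv n 128 > 0) := by rw [hq]; omega
      rw [pvDigits, if_neg hq0]
      refine ⟨by simp; omega, by simp; omega, by simp⟩
    · have hq0 : PySem.Int.floordiv n 128 > 0 := by rw [hq]; omega
      obtain ⟨ih1, ih2, ih3⟩ := ih hq0
      have hfm := PySem.Int.floordiv_mul_add_mod n 128
      have hmod0 : 0 ≤ PySem.Int.mod n 128 := PySem.Int.mod_nonneg _ (by norm_num)
      have hq1 : 0 ≤ PySem.Int.floordiv n 128 := le_of_lt hq0
      set q := PySem.Int.floordiv n 128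
      set t := (pvDigits q).length
      have hnq : n.toNat = q.toNat * 128 + (PySem.Int.mod n 128).toNat := by omega
      have hmlt : (PySem.Int.mod n 128).toNat < 128 := by
        have := PySem.Int.mod_lt n (show (0:Int) < 128 by norm_num)
        omega
      constructor
      · simp only [List.length_cons]
        have : 7 * (t + 1) = 7 * t + 7 := by ring
        rw [this, pow_add]
        have : (2:Nat) ^ 7 = 128 := by norm_num
        rw [this]
        nlinarith
      constructor
      · simp only [List.length_cons]
        have he : 7 * (t + 1 - 1) = 7 * (t - 1) + 7 := by omega
        rw [he, pow_add]
        have h27 : (2:Nat) ^ 7 = 128 := by norm_num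
        rw [h27]
        nlinarith
      · simp
  | case2 n hn => omega

-- the flattened 7-bit blocks of A's digits are the fixed-width binary of n
lemma pvBlocks_eq (n : Int) (h : 0 < n) :
    ((pvDigits n).reverse.map pvBin7).flatten = pvBinFix (7 * (pvDigits n).length) n.toNat := by
  induction n using pvDigits.induct with
  | case1 n hn ih =>
    rw [pvDigits, if_pos hn]
    have hq : PySem.Int.floordiv n 128 = n / 128 := PySem.Int.floordiv_eq_ediv_of_pos (by norm_num)
    have hmodn : PySem.Int.mod n 128 = n % 128 := PySem.Int.mod_eq_emod_of_pos (by norm_num)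
    by_cases hlt : n < 128
    · have hq0 : ¬ (PySem.Int.floordiv n 128 > 0) := by rw [hq]; omega
      rw [pvDigits, if_neg hq0]
      simp only [List.reverse_cons, List.reverse_nil, List.nil_append, List.map_cons, List.map_nil,
        List.flatten_cons, List.flatten_nil, List.append_nil, List.length_cons, List.length_nil]
      unfold pvBin7
      congr 1
      rw [hmodn]
      omega
    · have hq0 : PySem.Int.floordiv n 128 > 0 := by rw [hq]; omega
      have ihh := ih hq0
      simp only [List.reverse_cons, List.map_append, List.map_cons, List.map_nil,
        List.flatten_append, List.flatten_cons, List.flatten_nil, List.append_nil, List.length_cons]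
      rw [ihh, pvBinFix_split]
      congr 1
      · congr 1
        rw [hq]
        omega
      · unfold pvBin7
        congr 1
        rw [hmodn]
        omega
  | case2 n hn => omega

lemma pvBin7_len (d : Int) : (pvBin7 d).length = 7 := by simp [pvBin7, pvBinFix]

lemma pvFlatten_block (bl : List (List Char)) (h7 : ∀ c ∈ bl, c.length = 7) (k : Nat)
    (hk : k < bl.length) : (bl.flatten.drop (7 * k)).take 7 = bl[k] := by
  induction bl generalizing k with
  | nil => simp at hk
  | cons c bl ih =>
    have hc : c.length = 7 := h7 c (by simp)
    cases k with
    | zero =>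
      simp only [List.flatten_cons, Nat.mul_zero, List.drop_zero, List.getElem_cons_zero]
      rw [List.take_append_of_le_length (by omega), ← hc, List.take_length]
    | succ k =>
      have hsplit : 7 * (k + 1) = c.length + 7 * k := by omega
      rw [List.flatten_cons, hsplit, ← List.drop_drop, List.drop_append_length]
      exact ih (fun x hx => h7 x (by simp [hx])) k (by simpa using hk)

-- the chunk comprehension recovers the blocks
lemma pvChunks_eq (bl : List (List Char)) (h7 : ∀ c ∈ bl, c.length = 7) :
    (PySem.List.pyRange 0 ((bl.flatten.length : Int)) 7).map
      (fun i => PySem.List.slice bl.flatten (some i) (some (i + 7))) = bl := by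
  have hlen : bl.flatten.length = 7 * bl.length := by
    rw [List.length_flatten]
    induction bl with
    | nil => simp
    | cons c bl ih =>
      simp only [List.map_cons, List.sum_cons, h7 c (by simp)]
      rw [ih (fun x hx => h7 x (by simp [hx]))]
      simp only [List.length_cons]
      ring
  rw [hlen]
  rcases Nat.eq_zero_or_pos bl.length with h0 | hpos
  · have hnil : bl = [] := List.length_eq_zero_iff.mp h0
    subst hnil
    rw [PySem.List.pyRange_of_pos 0 ((7 * ([] : List (List Char)).length : Nat) : Int) (by norm_num)]
    simp
  · rw [PySem.List.pyRange_of_pos 0 ((7 * bl.length : Nat) : Int) (by norm_num)]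
    have hb : (0:Int) < ((7 * bl.length : Nat) : Int) := by positivity
    rw [if_pos hb]
    simp only [sub_zero]
    have harg : ((((7 * bl.length : Nat) : Int) + 7 - 1) / 7).toNat = bl.length := by
      push_cast
      omega
    rw [harg]
    apply List.ext_getElem
    · simp
    · intro k hk1 hk2
      simp only [List.getElem_map, List.getElem_range]
      have hzero : (0 : Int) + 7 * (k : Int) = ((7 * k : Nat) : Int) := by push_cast; ring
      have hseven : ((7 * k : Nat) : Int) + 7 = ((7 * k + 7 : Nat) : Int) := by push_cast; ring
      rw [hzero, hseven]
      have := PySem.List.slice_natCast_add bl.flatten (7 * k) 7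
      have hcast : ((7 * k : Nat) : Int) + ((7 : Nat) : Int) = ((7 * k + 7 : Nat) : Int) := by
        push_cast; ring
      rw [hcast] at this
      rw [this]
      rw [← pvFlatten_block bl h7 k (by simpa using hk2)]

-- the descending emit loop renders the digit list
lemma pvEmit_eq (ds : List Int) (acc : List Char) :
    (PySem.List.pyRange ((ds.length : Int) - 1) (-1) (-1)).foldl
      (fun out j => out ++ (if j == 0 then ['0'] else ['1'])
        ++ PySem.List.pyGetD (ds.reverse.map pvBin7) j []) acc
    = acc ++ pvRenderL ds := by
  induction ds generalizing acc with
  | nil =>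
    rw [PySem.List.pyRange_neg_one_eq_nil (by simp)]
    simp [pvRenderL]
  | cons d ds ih =>
    have hlen : ((d :: ds).length : Int) - 1 = (ds.length : Int) := by simp
    rw [hlen, PySem.List.pyRange_neg_one_cons (by omega), List.foldl_cons]
    have hget : PySem.List.pyGetD ((d :: ds).reverse.map pvBin7) ((ds.length : Int)) [] = pvBin7 d := by
      rw [PySem.List.pyGetD_natCast]
      simp only [List.reverse_cons, List.map_append, List.map_cons, List.map_nil]
      rw [List.getD_eq_getElem?_getD, List.getElem?_append_right (by simp)]
      simp
    rw [hget]
    cases ds with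
    | nil =>
      rw [PySem.List.pyRange_neg_one_eq_nil (by simp)]
      simp [pvRenderL]
    | cons d' rest =>
      have hne : ((((d' :: rest).length : Nat) : Int) == 0) = false := by
        rw [beq_eq_false_iff_ne]
        intro hcon
        simp at hcon
        omega
      rw [hne]
      simp only [Bool.false_eq_true, if_false]
      have hcongr : ∀ (out : List Char), ∀ j ∈ PySem.List.pyRange (((d' :: rest).length : Int) - 1) (-1) (-1),
          out ++ (if j == 0 then ['0'] else ['1'])
            ++ PySem.List.pyGetD ((d :: d' :: rest).reverse.map pvBin7) j []
          = out ++ (if j == 0 then ['0'] else ['1'])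
            ++ PySem.List.pyGetD ((d' :: rest).reverse.map pvBin7) j [] := by
        intro out j hj
        rw [PySem.List.mem_pyRange_neg_one] at hj
        simp only [List.length_cons] at hj
        have hj0 : 0 ≤ j := by omega
        congr 1
        rw [PySem.List.pyGetD_eq_getElem _ _ hj0 (by simp; omega),
            PySem.List.pyGetD_eq_getElem _ _ hj0 (by simp; omega)]
        simp only [List.reverse_cons, List.map_append]
        rw [List.getElem_append_left (by simp; omega)]
      rw [PySem.List.foldl_congr_mem _ _ _ _ hcongr, ih]
      have : pvRenderL (d :: d' :: rest) = '1' :: pvBin7 d ++ pvRenderL (d' :: rest) := rfl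
      rw [this]
      simp

-- ===== VERDICT (by name: the statement is the Claim_ definition above) =====
theorem encodeRemainingLength_spec : Claim_equal_encodeRemainingLength := by
  intro n _ hpre
  unfold Spec_encodeRemainingLength encodeRemainingLength encodeRemainingLength_alt
  by_cases h0 : n == 0
  · simp [h0]
  · have hn : 0 < n := by
      have := (beq_iff_eq (α := Int)).not.mp (by simpa using h0)
      unfold Pre_encodeRemainingLength at hpre
      omega
    simp only [h0, Bool.false_eq_true, if_false]
    rw [pvEncALoop_eq, pvRenderA_eq _ (pvDigits_bounds n)]
    have hA : ("" : String) ++ String.ofList (pvRenderL (pvDigits n))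
        = String.ofList (pvRenderL (pvDigits n)) := by
      simp
    rw [hA]
    have hb0 : PySem.Int.toBinChars n = Nat.toDigits 2 n.toNat := by
      unfold PySem.Int.toBinChars
      rw [if_neg (by omega)]
    have hlt := pvToDigits_lt n.toNat
    have hge := pvToDigits_ge n.toNat (by omega)
    have hLpos := pvToDigits_len_pos n.toNat
    obtain ⟨hb1, hb2, ht1⟩ := pvDigits_brackets n hn
    have hL1 : (Nat.toDigits 2 n.toNat).length ≤ 7 * (pvDigits n).length := by
      have := hge.trans_lt hb1
      rw [Nat.pow_lt_pow_iff_right (by norm_num)] at this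
      omega
    have hL2 : 7 * (pvDigits n).length < (Nat.toDigits 2 n.toNat).length + 7 := by
      have := hb2.trans_lt hlt
      rw [Nat.pow_lt_pow_iff_right (by norm_num)] at this
      omega
    have hpad : PySem.Int.mod (-(((Nat.toDigits 2 n.toNat).length : Nat) : Int)) 7
        = ((7 * (pvDigits n).length - (Nat.toDigits 2 n.toNat).length : Nat) : Int) := by
      rw [PySem.Int.mod_eq_emod_of_pos (by norm_num)]
      omega
    have hbits : List.replicate (7 * (pvDigits n).length - (Nat.toDigits 2 n.toNat).length) '0'
          ++ Nat.toDigits 2 n.toNat = ((pvDigits n).reverse.map pvBin7).flatten := by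
      rw [pvPadded_eq (7 * (pvDigits n).length) n.toNat (by omega)
            (lt_of_lt_of_le hlt (Nat.pow_le_pow_right (by norm_num) hL1))]
      rw [pvBlocks_eq n hn]
    have h7 : ∀ c ∈ (pvDigits n).reverse.map pvBin7, c.length = 7 := by
      intro c hc
      simp only [List.mem_map] at hc
      obtain ⟨d, _, hd⟩ := hc
      rw [← hd, pvBin7_len]
    rw [hb0, hpad, Int.toNat_natCast, hbits, pvChunks_eq _ h7]
    have hlen2 : (((pvDigits n).reverse.map pvBin7).length : Int) = ((pvDigits n).length : Int) := by
      simp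
    rw [hlen2, pvEmit_eq (pvDigits n) []]
    rw [List.nil_append]
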